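-- pv_equiv track=rewrite | github.com/ecurtin2/Project-Euler | src/067.py | locs_from_path
-- ===== SOURCE A (Python) =====
-- def locs_from_path(path):
--     current_idx = 0
--     current_layer = 0
--     locs = [(current_layer, current_idx)]
--     for step in path[1:]:
--         current_idx += step
--         current_layer += 1
--         locs.append((current_layer, current_idx))
--     return locs
-- ===== SOURCE B (Python) =====
-- def locs_from_path(path):
--     def sums(seg):
--         # divide-and-conquer cumulative sums: solve both halves, then shift the right half
--         if len(seg) <= 1:
--             return list(seg)
--         mid = len(seg) // 2
--         left = sums(seg[:mid])
--         right = sums(seg[mid:])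
--         base = left[-1]
--         return left + [base + x for x in right]
--     return [(0, 0)] + list(enumerate(sums(path[1:]), 1))
-- ===== Notes on version B (the rewrite author's own statement) =====
-- stated objective: alternative
-- what changed: A's single stateful loop carrying a running (index, layer) accumulator is replaced by a divide-and-conquer cumulative-sum: the step list is split in halves, each half solved recursively, the right half shifted by the left total, and layers attached afterwards with enumerate.
import Mathlib
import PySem

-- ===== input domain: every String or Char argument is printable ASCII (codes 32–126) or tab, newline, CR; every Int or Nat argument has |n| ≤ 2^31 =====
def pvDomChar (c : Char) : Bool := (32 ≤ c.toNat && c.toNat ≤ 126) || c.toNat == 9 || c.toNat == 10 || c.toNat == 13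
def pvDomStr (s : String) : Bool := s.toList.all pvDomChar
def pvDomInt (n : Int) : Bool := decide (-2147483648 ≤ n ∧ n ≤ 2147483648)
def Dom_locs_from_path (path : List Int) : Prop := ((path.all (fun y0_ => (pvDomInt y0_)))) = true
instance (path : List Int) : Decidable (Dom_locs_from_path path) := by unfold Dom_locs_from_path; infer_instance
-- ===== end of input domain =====

-- B replaces A's stateful running-sum loop by divide-and-conquer cumulative sums (halve, solve, shift right half) plus enumerate; alternative, same result.

-- ===== PORT A =====
-- state = (current_idx, current_layer, locs), one fold over path[1:]
def locs_from_path (path : List Int) : List (Int × Int) :=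
  let s := (PySem.List.slice path (some 1) none).foldl
    (fun (s : Int × Int × List (Int × Int)) step =>
      let current_idx := s.1 + step
      let current_layer := s.2.1 + 1
      (current_idx, current_layer, s.2.2 ++ [(current_layer, current_idx)]))
    (0, 0, [((0 : Int), (0 : Int))])
  s.2.2

-- ===== PORT B =====
-- helper sums(seg): if len(seg) <= 1 return list(seg); mid = len(seg)//2 (len ≥ 2 so
-- Python's // equals Nat division; seg[:mid]/seg[mid:] with 0 ≤ mid ≤ len are exactly
-- take/drop); left[-1] on the non-empty left is exactly getLast!
def pvSums (seg : List Int) : List Int :=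
  if _h : seg.length ≤ 1 then seg
  else
    let mid := seg.length / 2
    let left := pvSums (seg.take mid)
    let right := pvSums (seg.drop mid)
    let base := left.getLast!
    left ++ right.map (fun x => base + x)
termination_by seg.length
decreasing_by
  · simp only [List.length_take]; omega
  · simp only [List.length_drop]; omega

-- [(0, 0)] + list(enumerate(sums(path[1:]), 1))
def locs_from_path_alt (path : List Int) : List (Int × Int) :=
  [((0 : Int), (0 : Int))] ++ PySem.List.enumerate (pvSums (PySem.List.slice path (some 1) none)) 1

-- ===== PRECONDITION & SPEC =====
def Spec_locs_from_path (path : List Int) (out : List (Int × Int)) : Prop := out = locs_from_path_alt path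
instance (path : List Int) (out : List (Int × Int)) : Decidable (Spec_locs_from_path path out) := by unfold Spec_locs_from_path; infer_instance

-- ===== CLAIM (what is proved, stated in full; the proofs are below) =====
def Claim_equal_locs_from_path : Prop := ∀ (path : List Int), Dom_locs_from_path path → Spec_locs_from_path path (locs_from_path path)

-- ===== LEMMAS AND PROOFS =====

-- successive (layer, idx) pairs produced by A's loop after state (idx, layer)
def pvTailLocs : List Int → Int → Int → List (Int × Int)
  | [], _, _ => []
  | s :: ss, idx, layer => (layer + 1, idx + s) :: pvTailLocs ss (idx + s) (layer + 1)

lemma locsA_fold (steps : List Int) (idx layer : Int) (locs : List (Int × Int)) :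
    (steps.foldl
      (fun (s : Int × Int × List (Int × Int)) step =>
        let ci := s.1 + step
        let cl := s.2.1 + 1
        (ci, cl, s.2.2 ++ [(cl, ci)])) (idx, layer, locs)).2.2
    = locs ++ pvTailLocs steps idx layer := by
  induction steps generalizing idx layer locs with
  | nil => simp [pvTailLocs]
  | cons s ss ih =>
    simp only [List.foldl_cons, pvTailLocs]
    rw [ih]
    simp

-- closed form of A's tail list
lemma tailLocs_closed (steps : List Int) (idx layer : Int) :
    pvTailLocs steps idx layer
    = (List.range steps.length).map
        (fun (k : Nat) => ((layer + 1 + (k : Int), idx + ((steps.take (k + 1)).sum)) : Int × Int)) := by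
  induction steps generalizing idx layer with
  | nil => simp [pvTailLocs]
  | cons s ss ih =>
    simp only [pvTailLocs, List.length_cons, List.range_succ_eq_map, List.map_cons,
      List.map_map, ih]
    rw [List.cons_eq_cons]
    refine ⟨by simp, ?_⟩
    apply List.map_congr_left
    intro k _
    simp only [Function.comp, Prod.ext_iff]
    refine ⟨by push_cast; ring, ?_⟩
    simp only [List.take_succ_cons, List.sum_cons]; ring

-- the list of prefix sums of seg (lengths 1..len)
def pvP (seg : List Int) : List Int :=
  (List.range seg.length).map (fun k => (seg.take (k + 1)).sum)

lemma pvP_append (a b : List Int) :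
    pvP (a ++ b) = pvP a ++ (pvP b).map (fun x => a.sum + x) := by
  unfold pvP
  rw [List.length_append, List.range_add, List.map_append, List.map_map, List.map_map]
  congr 1
  · apply List.map_congr_left
    intro k hk
    rw [List.mem_range] at hk
    rw [List.take_append_of_le_length (by omega)]
  · apply List.map_congr_left
    intro j _
    simp only [Function.comp]
    rw [List.take_append, List.take_of_length_le (by omega), List.sum_append]
    have he : a.length + j + 1 - a.length = j + 1 := by omega
    rw [he]

lemma pvP_getLast! (a : List Int) (h : a ≠ []) : (pvP a).getLast! = a.sum := by
  obtain ⟨m, hm⟩ : ∃ m, a.length = m + 1 := by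
    cases a with
    | nil => exact absurd rfl h
    | cons x xs => exact ⟨xs.length, rfl⟩
  unfold pvP
  rw [hm, List.range_succ, List.map_append, List.map_singleton]
  have hg : (List.map (fun k => (List.take (k + 1) a).sum) (List.range m)
      ++ [(List.take (m + 1) a).sum]).getLast! = (List.take (m + 1) a).sum := by simp
  rw [hg, List.take_of_length_le (by omega)]

lemma pvSums_eq (seg : List Int) : pvSums seg = pvP seg := by
  induction hn : seg.length using Nat.strong_induction_on generalizing seg with
  | _ n ih =>
    by_cases h : seg.length ≤ 1
    · rw [pvSums, dif_pos h]
      cases seg with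
      | nil => simp [pvP]
      | cons x xs =>
        have : xs = [] := by
          cases xs with
          | nil => rfl
          | cons y ys => simp at h
        subst this
        simp [pvP]
    · rw [pvSums, dif_neg h]
      have h2 : 2 ≤ seg.length := by omega
      have hmid1 : 1 ≤ seg.length / 2 := by omega
      have hmidlt : seg.length / 2 < seg.length := by omega
      have hL := ih (seg.take (seg.length / 2)).length
        (by simp only [List.length_take]; omega) (seg.take (seg.length / 2)) rfl
      have hR := ih (seg.drop (seg.length / 2)).length
        (by simp only [List.length_drop]; omega) (seg.drop (seg.length / 2)) rfl
      simp only [hL, hR]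
      have htne : seg.take (seg.length / 2) ≠ [] :=
        List.ne_nil_of_length_pos (by simp only [List.length_take]; omega)
      rw [pvP_getLast! _ htne]
      rw [← pvP_append, List.take_append_drop]

-- enumerate over a mapped range is the range of shifted pairs
lemma enumerate_map_range (f : Nat → Int) (n : Nat) (s : Int) :
    PySem.List.enumerate ((List.range n).map f) s
    = (List.range n).map (fun (k : Nat) => ((s + (k : Int), f k) : Int × Int)) := by
  induction n generalizing f s with
  | zero => rfl
  | succ m ih =>
    rw [List.range_succ_eq_map, List.map_cons, PySem.List.enumerate_cons, List.map_map,
      List.map_cons, List.map_map]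
    rw [ih (f ∘ Nat.succ) (s + 1)]
    rw [List.cons_eq_cons]
    refine ⟨by simp, ?_⟩
    apply List.map_congr_left
    intro k _
    simp only [Function.comp, Prod.ext_iff, Nat.succ_eq_add_one]
    refine ⟨by push_cast; ring, ?_⟩
    trivial

-- ===== VERDICT (by name: the statement is the Claim_ definition above) =====
theorem locs_from_path_spec : Claim_equal_locs_from_path := by
  intro path _
  unfold Spec_locs_from_path locs_from_path locs_from_path_alt
  rw [locsA_fold, tailLocs_closed, pvSums_eq]
  unfold pvP
  rw [enumerate_map_range]
  congr 1
  apply List.map_congr_left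
  intro k _
  simp only [Prod.ext_iff]
  exact ⟨by ring, by simp⟩
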